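-- pv_equiv track=rewrite | github.com/ahfmrptEkd/Linear-Algebra | 3. More Matrix/mm_func.py | ele2diag
-- ===== SOURCE A (Python) =====
-- def ele2diag(a):
--     """
--     대각 원소로 대각 행렬 변환
--     input: 대각 원소 리스트 a
--     output: n x n 크기의 대각 행렬 D
--     """
--     n = len(a)
--     D = []
--     for i in range(0, n):
--         row = []
--         for j in range(0, n):
--             if i == j:
--                 row.append(a[i])
--             else:
--                 row.append(0)
--         D.append(row)
--     return D
-- ===== SOURCE B (Python) =====
-- def ele2diag(a):
--     if not a:
--         return []
--     sub = ele2diag(a[1:])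
--     return [[a[0]] + [0] * len(sub)] + [[0] + row for row in sub]
-- ===== Notes on version B (the rewrite author's own statement) =====
-- stated objective: alternative
-- what changed: B builds the matrix by structural recursion on the list (bordering the diagonal matrix of the tail with a first row [a0,0,...,0] and a leading 0 on every sub-row), instead of nested index loops with an i==j test.
import Mathlib
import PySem

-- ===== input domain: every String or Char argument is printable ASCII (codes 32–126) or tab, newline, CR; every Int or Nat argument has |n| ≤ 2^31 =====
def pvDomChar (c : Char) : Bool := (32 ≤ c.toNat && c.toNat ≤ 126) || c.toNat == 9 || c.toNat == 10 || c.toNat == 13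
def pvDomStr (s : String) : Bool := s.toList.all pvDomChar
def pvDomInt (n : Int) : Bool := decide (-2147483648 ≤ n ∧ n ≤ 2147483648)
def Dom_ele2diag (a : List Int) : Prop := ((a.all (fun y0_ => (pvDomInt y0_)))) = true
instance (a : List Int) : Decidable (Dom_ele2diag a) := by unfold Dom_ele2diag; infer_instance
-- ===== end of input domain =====

-- B builds the matrix by structural recursion (border the tail's diagonal matrix), instead of A's nested index loops with an i==j test; same cost.

-- ===== PORT A =====
def ele2diag (a : List Int) : List (List Int) :=
  let n : Int := a.length
  (PySem.List.pyRange 0 n 1).foldl (fun D i =>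
    let row := (PySem.List.pyRange 0 n 1).foldl (fun row j =>
      if i = j then row ++ [PySem.List.pyGetD a i 0] else row ++ [(0 : Int)]) []
    D ++ [row]) []

-- ===== PORT B =====
-- Source B: recursion on a; 'a[1:]' is the tail, '[0]*len(sub)' a replicate, the comprehension a map
def ele2diag_alt : List Int → List (List Int)
  | [] => []
  | x :: rest =>
    let sub := ele2diag_alt rest
    ((x :: List.replicate sub.length (0 : Int)) :: sub.map (fun row => (0 : Int) :: row))

-- ===== PRECONDITION & SPEC =====
def Spec_ele2diag (a : List Int) (out : List (List Int)) : Prop := out = ele2diag_alt a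
instance (a : List Int) (out : List (List Int)) : Decidable (Spec_ele2diag a out) := by unfold Spec_ele2diag; infer_instance

-- ===== CLAIM (what is proved, stated in full; the proofs are below) =====
def Claim_equal_ele2diag : Prop := ∀ (a : List Int), Dom_ele2diag a → Spec_ele2diag a (ele2diag a)

-- ===== LEMMAS AND PROOFS =====

lemma pyRange_cast (n : Nat) :
    PySem.List.pyRange 0 (n : Int) 1 = List.map (fun (k : Nat) => (k : Int)) (List.range n) := by
  rw [PySem.List.pyRange_zero_natCast]

-- A's result: row i is the obvious map over range n
lemma ele2diag_eq_map (a : List Int) :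
    ele2diag a = (List.range a.length).map (fun (i : Nat) =>
      (List.range a.length).map (fun (j : Nat) =>
        if i = j then a.getD i 0 else 0)) := by
  have h1 : ∀ k : Nat, (List.range a.length).foldl
      (fun (row : List Int) (j : Nat) =>
        if (k:Int) = (j:Int) then row ++ [PySem.List.pyGetD a (k:Int) 0] else row ++ [(0:Int)]) []
      = (List.range a.length).map (fun (j : Nat) => if k = j then a.getD k 0 else 0) := by
    intro k
    have hs : (fun (row : List Int) (j : Nat) =>
        if (k:Int) = (j:Int) then row ++ [PySem.List.pyGetD a (k:Int) 0] else row ++ [(0:Int)])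
        = fun (row : List Int) (j : Nat) => row ++ [if k = j then a.getD k 0 else 0] := by
      funext row j
      by_cases h : k = j
      · subst h; simp
      · rw [if_neg (by exact_mod_cast h), if_neg h]
    rw [hs, PySem.List.foldl_append_singleton_eq_map, List.nil_append]
  unfold ele2diag
  simp only [pyRange_cast, List.foldl_map, h1]
  rw [PySem.List.foldl_append_singleton_eq_map, List.nil_append]

lemma alt_length (a : List Int) : (ele2diag_alt a).length = a.length := by
  induction a with
  | nil => rfl
  | cons x rest ih => simp [ele2diag_alt, ih]

-- B's bordered recursion produces exactly the same map-over-range matrix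
lemma ele2diag_alt_eq_map (a : List Int) :
    ele2diag_alt a = (List.range a.length).map (fun (i : Nat) =>
      (List.range a.length).map (fun (j : Nat) =>
        if i = j then a.getD i 0 else 0)) := by
  induction a with
  | nil => rfl
  | cons x rest ih =>
    show ((x :: List.replicate (ele2diag_alt rest).length (0 : Int)) ::
        (ele2diag_alt rest).map (fun row => (0 : Int) :: row)) = _
    rw [alt_length, ih, List.map_map]
    simp only [List.length_cons, List.range_succ_eq_map, List.map_cons, List.map_map,
      Function.comp_def]
    refine congrArg₂ List.cons ?_ ?_
    · -- first row: x followed by zeros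
      simp [List.map_const']
    · -- remaining rows: 0 prepended to the tail's rows
      apply List.map_congr_left
      intro k hk
      simp

-- ===== VERDICT (by name: the statement is the Claim_ definition above) =====
theorem ele2diag_spec : Claim_equal_ele2diag := by
  intro a _
  unfold Spec_ele2diag
  rw [ele2diag_eq_map, ele2diag_alt_eq_map]
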